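-- pv_equiv track=rewrite | github.com/DevilCoders/Yandex | library/python/svn_ssh/__init__.py | _sanitize_svn_ssh
-- ===== SOURCE A (Python) =====
-- def _sanitize_svn_ssh(svn_ssh, rm_args=None, rm_options=None):
--     rm_options = rm_options or []
--     rm_args = rm_args or []
--     clean_svn_ssh = []
--
--     arg_name = None
--     for arg in svn_ssh.split():
--         if arg.startswith("-"):
--             if arg_name and arg_name not in rm_args:
--                 clean_svn_ssh.append(arg_name)
--             arg_name = arg
--         else:
--             if arg_name not in rm_args and not (arg_name == "-o" and arg.split("=", 1)[0] in rm_options):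
--                 if arg_name:
--                     clean_svn_ssh.append(arg_name)
--                 clean_svn_ssh.append(arg)
--             arg_name = None
--
--     if arg_name and arg_name not in rm_args:
--         clean_svn_ssh.append(arg_name)
--
--     clean_svn_ssh = ' '.join(clean_svn_ssh)
--
--     return clean_svn_ssh
-- ===== SOURCE B (Python) =====
-- def _sanitize_svn_ssh(svn_ssh, rm_args=None, rm_options=None):
--     rm_args = rm_args or []
--     rm_options = rm_options or []
--
--     # pass 1: group tokens into (option, value) pairs; a standalone value is (None, v)
--     groups = []
--     pending = None
--     for tok in svn_ssh.split():
--         if tok.startswith("-"):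
--             if pending:
--                 groups.append((pending, None))
--             pending = tok
--         elif pending:
--             groups.append((pending, tok))
--             pending = None
--         else:
--             groups.append((None, tok))
--             pending = None
--     if pending:
--         groups.append((pending, None))
--
--     # pass 2: filter groups and flatten
--     kept = []
--     for opt, val in groups:
--         if opt is None:
--             kept.append(val)
--         elif opt in rm_args:
--             pass
--         elif val is None:
--             kept.append(opt)
--         elif opt == "-o" and val.split("=", 1)[0] in rm_options:
--             pass
--         else:
--             kept.append(opt)
--             kept.append(val)
--     return " ".join(kept)
-- ===== Notes on version B (the rewrite author's own statement) =====
-- stated objective: alternative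
-- what changed: Replaces A's single pass with carried arg_name state and inline flush logic by a two-pass decomposition: first group the tokens into (option, value) pairs (standalone values get no option), then filter whole groups against rm_args/rm_options and flatten.
import Mathlib
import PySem

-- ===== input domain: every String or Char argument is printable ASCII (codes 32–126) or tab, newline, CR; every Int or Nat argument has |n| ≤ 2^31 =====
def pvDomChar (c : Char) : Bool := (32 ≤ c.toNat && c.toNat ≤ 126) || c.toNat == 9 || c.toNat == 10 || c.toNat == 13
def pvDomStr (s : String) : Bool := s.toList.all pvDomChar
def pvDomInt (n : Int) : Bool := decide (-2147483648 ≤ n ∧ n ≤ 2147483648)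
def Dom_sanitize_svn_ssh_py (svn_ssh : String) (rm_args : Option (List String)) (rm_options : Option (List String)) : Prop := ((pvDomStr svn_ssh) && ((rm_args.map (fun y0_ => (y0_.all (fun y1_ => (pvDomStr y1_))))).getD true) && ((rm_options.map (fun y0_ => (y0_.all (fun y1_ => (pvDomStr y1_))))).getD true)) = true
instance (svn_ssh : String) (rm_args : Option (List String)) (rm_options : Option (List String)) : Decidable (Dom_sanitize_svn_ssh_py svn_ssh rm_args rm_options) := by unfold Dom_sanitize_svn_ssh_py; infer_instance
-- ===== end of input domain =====

-- B replaces A's one-pass loop with carried option state by a two-pass decomposition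
-- (group tokens into option/value pairs, then filter the groups); objective: alternative/simpler, not faster.

-- shared helper: arg.split("=", 1)[0]  (split with a non-empty separator is never empty, so head is exact)
def pvFirstField (s : String) : String :=
  match PySem.Str.splitMax? s "=" 1 with
  | some (h :: _) => h
  | _ => ""

-- ===== PORT A =====
-- the for-loop of A, state = (arg_name, clean_svn_ssh); final flush at the end of the list
def pvALoop (rm_args rm_options : List String) : List String → Option String → List String → List String
  | [], arg_name, acc =>
      -- if arg_name and arg_name not in rm_args: append
      match arg_name with
      | some a => if a ≠ "" ∧ a ∉ rm_args then acc ++ [a] else acc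
      | none => acc
  | arg :: rest, arg_name, acc =>
      if PySem.Str.startswith arg "-" then
        let acc' :=
          match arg_name with
          | some a => if a ≠ "" ∧ a ∉ rm_args then acc ++ [a] else acc
          | none => acc
        pvALoop rm_args rm_options rest (some arg) acc'
      else
        -- arg_name not in rm_args (None is never in a list of strings) and not (arg_name == "-o" and …)
        let keep :=
          (match arg_name with | none => true | some a => !rm_args.contains a)
          && !((arg_name == some "-o") && rm_options.contains (pvFirstField arg))
        if keep then
          let acc' :=
            match arg_name with
            | some a => if a ≠ "" then acc ++ [a] else acc
            | none => acc
          pvALoop rm_args rm_options rest none (acc' ++ [arg])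
        else
          pvALoop rm_args rm_options rest none acc

def sanitize_svn_ssh_py (svn_ssh : String) (rm_args : Option (List String)) (rm_options : Option (List String)) : String :=
  let rm_options := rm_options.getD []   -- rm_options or []
  let rm_args := rm_args.getD []         -- rm_args or []
  PySem.Str.join " " (pvALoop rm_args rm_options (PySem.Str.split₀ svn_ssh) none [])

-- ===== PORT B =====
-- pass 1 of Source B: build the group list; a group is (option?, value?), standalone value = (none, some v)
def pvBGroups : List String → Option String → List (Option String × Option String)
  | [], pending =>
      match pending with
      | some p => if p ≠ "" then [(some p, none)] else []
      | none => []
  | tok :: rest, pending =>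
      if PySem.Str.startswith tok "-" then
        (match pending with
         | some p => if p ≠ "" then [(some p, none)] else []
         | none => []) ++ pvBGroups rest (some tok)
      else
        match pending with
        | some p =>
            if p ≠ "" then (some p, some tok) :: pvBGroups rest none
            else (none, some tok) :: pvBGroups rest none
        | none => (none, some tok) :: pvBGroups rest none

-- pass 2 of Source B: what one group contributes to kept
def pvBKeep (rm_args rm_options : List String) : Option String × Option String → List String
  | (none, some v) => [v]
  | (none, none) => []
  | (some o, none) => if o ∈ rm_args then [] else [o]
  | (some o, some v) =>
      if o ∈ rm_args then []
      else if o = "-o" ∧ pvFirstField v ∈ rm_options then []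
      else [o, v]

def sanitize_svn_ssh_py_alt (svn_ssh : String) (rm_args : Option (List String)) (rm_options : Option (List String)) : String :=
  let rm_args := rm_args.getD []
  let rm_options := rm_options.getD []
  PySem.Str.join " " ((pvBGroups (PySem.Str.split₀ svn_ssh) none).flatMap (pvBKeep rm_args rm_options))

-- ===== PRECONDITION & SPEC =====
def Spec_sanitize_svn_ssh_py (svn_ssh : String) (rm_args : Option (List String)) (rm_options : Option (List String)) (out : String) : Prop := out = sanitize_svn_ssh_py_alt svn_ssh rm_args rm_options
instance (svn_ssh : String) (rm_args : Option (List String)) (rm_options : Option (List String)) (out : String) : Decidable (Spec_sanitize_svn_ssh_py svn_ssh rm_args rm_options out) := by unfold Spec_sanitize_svn_ssh_py; infer_instance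

-- ===== CLAIM (what is proved, stated in full; the proofs are below) =====
def Claim_equal_sanitize_svn_ssh_py : Prop := ∀ (svn_ssh : String) (rm_args : Option (List String)) (rm_options : Option (List String)), Dom_sanitize_svn_ssh_py svn_ssh rm_args rm_options → Spec_sanitize_svn_ssh_py svn_ssh rm_args rm_options (sanitize_svn_ssh_py svn_ssh rm_args rm_options)

-- ===== LEMMAS AND PROOFS =====

-- a token that starts with "-" is nonempty
lemma pv_startswith_ne_empty {tok : String} (h : PySem.Str.startswith tok "-" = true) : tok ≠ "" := by
  intro he; subst he
  rw [PySem.Str.startswith_eq] at h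
  have := (PySem.Chars.startswith_iff _ _).mp h
  simp at this

-- the loop of A produces exactly the flattened filtered groups of B
lemma pv_key (ra ro : List String) : ∀ (toks : List String) (pending : Option String)
    (acc : List String), pending ≠ some "" →
    pvALoop ra ro toks pending acc = acc ++ (pvBGroups toks pending).flatMap (pvBKeep ra ro) := by
  intro toks
  induction toks with
  | nil =>
      intro pending acc hp
      cases pending with
      | none => simp [pvALoop, pvBGroups]
      | some p =>
          have hpne : p ≠ "" := fun he => hp (by simp [he])
          simp only [pvALoop, pvBGroups, if_pos hpne]
          by_cases hmem : p ∈ ra <;> simp [pvBKeep, hpne, hmem]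
  | cons tok rest ih =>
      intro pending acc hp
      by_cases hstart : PySem.Str.startswith tok "-" = true
      · have htok : tok ≠ "" := pv_startswith_ne_empty hstart
        cases pending with
        | none =>
            simp only [pvALoop, pvBGroups, hstart, if_pos]
            rw [ih (some tok) acc (by simp [htok])]
            simp
        | some p =>
            have hpne : p ≠ "" := fun he => hp (by simp [he])
            simp only [pvALoop, pvBGroups, hstart, if_pos, if_pos hpne]
            by_cases hmem : p ∈ ra
            · rw [if_neg (by simp [hmem])]
              rw [ih (some tok) acc (by simp [htok])]
              simp [pvBKeep, hmem]
            · rw [if_pos ⟨hpne, hmem⟩]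
              rw [ih (some tok) (acc ++ [p]) (by simp [htok])]
              simp [pvBKeep, hmem]
      · have hstart' : PySem.Str.startswith tok "-" = false := by
          cases hb : PySem.Str.startswith tok "-" <;> simp_all
        cases pending with
        | none =>
            simp only [pvALoop, pvBGroups, hstart']
            rw [if_neg (by simp), ih none (acc ++ [tok]) (by simp)]
            simp [pvBKeep]
        | some p =>
            have hpne : p ≠ "" := fun he => hp (by simp [he])
            simp only [pvALoop, pvBGroups, hstart']
            rw [if_neg (by simp), if_pos hpne]
            by_cases hmem : p ∈ ra
            · rw [if_neg (by simp [hmem]), ih none acc (by simp)]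
              simp [pvBKeep, hmem, hpne]
            · by_cases ho : p = "-o" ∧ pvFirstField tok ∈ ro
              · rw [if_neg (by simp [ho.1, ho.2]), ih none acc (by simp)]
                simp [pvBKeep, ho.1, ho.2]
              · have hkeep : ((!ra.contains p) &&
                    !((some p == some "-o") && ro.contains (pvFirstField tok))) = true := by
                  simp only [Bool.and_eq_true, Bool.not_eq_true', List.contains_eq_mem]
                  constructor
                  · simp [hmem]
                  · by_cases hpo : p = "-o"
                    · have : pvFirstField tok ∉ ro := fun hv => ho ⟨hpo, hv⟩
                      simp [hpo, this]
                    · simp [hpo]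
                rw [if_pos hkeep, if_pos hpne, ih none (acc ++ [p] ++ [tok]) (by simp)]
                have hbk : pvBKeep ra ro (some p, some tok) = [p, tok] := by
                  simp [pvBKeep, hmem, ho]
                simp [hbk, hpne]

-- ===== VERDICT (by name: the statement is the Claim_ definition above) =====
theorem sanitize_svn_ssh_py_spec : Claim_equal_sanitize_svn_ssh_py := by
  intro svn_ssh rm_args rm_options _
  unfold Spec_sanitize_svn_ssh_py sanitize_svn_ssh_py sanitize_svn_ssh_py_alt
  show PySem.Str.join " " (pvALoop (rm_args.getD []) (rm_options.getD []) (PySem.Str.split₀ svn_ssh) none []) =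
    PySem.Str.join " " ((pvBGroups (PySem.Str.split₀ svn_ssh) none).flatMap (pvBKeep (rm_args.getD []) (rm_options.getD [])))
  rw [pv_key _ _ _ none [] (by simp)]
  simp
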